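-- pv_equiv track=rewrite | github.com/jeonyujin4209/crypto_ctf | cryptohack/Crypto on the Web/TLS Part 1 The Protocol/Decrypting TLS 1.2/solve.py | split_after_ccs
-- ===== SOURCE A (Python) =====
-- def split_after_ccs(records):
--     out = []
--     seen = False
--     for r in records:
--         if seen:
--             out.append(r)
--         if r[0] == 20:
--             seen = True
--     return out
-- ===== SOURCE B (Python) =====
-- def split_after_ccs(records):
--     records = list(records)
--     for i, r in enumerate(records):
--         if r[0] == 20:
--             return records[i + 1:]
--     return []
-- ===== Notes on version B (the rewrite author's own statement) =====
-- stated objective: simpler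
-- what changed: B locates the first type-20 record and returns the slice after it, instead of A's boolean flag with per-element append.
import Mathlib
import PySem

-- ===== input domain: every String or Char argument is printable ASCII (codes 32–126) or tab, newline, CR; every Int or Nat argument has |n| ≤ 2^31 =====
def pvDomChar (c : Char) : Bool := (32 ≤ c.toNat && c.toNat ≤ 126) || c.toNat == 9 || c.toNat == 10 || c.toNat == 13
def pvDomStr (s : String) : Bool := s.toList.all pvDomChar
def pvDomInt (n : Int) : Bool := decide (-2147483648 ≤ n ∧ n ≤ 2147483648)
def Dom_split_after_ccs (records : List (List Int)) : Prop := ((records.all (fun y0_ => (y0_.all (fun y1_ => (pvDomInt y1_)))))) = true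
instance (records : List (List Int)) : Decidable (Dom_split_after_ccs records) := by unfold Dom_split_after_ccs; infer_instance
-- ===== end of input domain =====

-- B replaces A's boolean flag + per-element append by locate-the-first-type-20-record
-- then return the tail slice after it (objective: simpler).

-- ===== PORT A =====
-- loop over records carrying (out, seen); r[0] ported as PySem.List.pyGet? (none = IndexError, excluded by Pre_)
def split_after_ccs_loop (rs : List (List Int)) (seen : Bool) (out : List (List Int)) : List (List Int) :=
  match rs with
  | [] => out
  | r :: rest =>
      let out' := if seen then out ++ [r] else out
      let seen' := if PySem.List.pyGet? r 0 = some 20 then true else seen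
      split_after_ccs_loop rest seen' out'

def split_after_ccs (records : List (List Int)) : List (List Int) :=
  split_after_ccs_loop records false []

-- ===== PORT B =====
-- scan for the first record with r[0] == 20; the remainder after it is records[i+1:]
def split_after_ccs_alt (records : List (List Int)) : List (List Int) :=
  match records with
  | [] => []
  | r :: rest =>
      if PySem.List.pyGet? r 0 = some 20 then rest
      else split_after_ccs_alt rest

-- ===== PRECONDITION & SPEC =====
-- Pre_ excludes inputs containing an empty record: Python A evaluates r[0] on every
-- record and raises IndexError there.
def Pre_split_after_ccs (records : List (List Int)) : Prop := ∀ r ∈ records, r ≠ []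
instance (records : List (List Int)) : Decidable (Pre_split_after_ccs records) := by unfold Pre_split_after_ccs; infer_instance

def pvWitness_split_after_ccs : List (List Int) := [[22, 1], [20], [23, 5], [23, 7]]

def Spec_split_after_ccs (records : List (List Int)) (out : List (List Int)) : Prop := out = split_after_ccs_alt records
instance (records : List (List Int)) (out : List (List Int)) : Decidable (Spec_split_after_ccs records out) := by unfold Spec_split_after_ccs; infer_instance

-- ===== CLAIM (what is proved, stated in full; the proofs are below) =====
def Claim_equal_split_after_ccs : Prop := ∀ (records : List (List Int)), Dom_split_after_ccs records → Pre_split_after_ccs records → Spec_split_after_ccs records (split_after_ccs records)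

-- ===== LEMMAS AND PROOFS =====

-- once seen, A appends every remaining record
lemma split_after_ccs_loop_seen (rs : List (List Int)) (out : List (List Int)) :
    split_after_ccs_loop rs true out = out ++ rs := by
  induction rs generalizing out with
  | nil => simp [split_after_ccs_loop]
  | cons r rest ih => simp [split_after_ccs_loop, ih]

lemma split_after_ccs_loop_unseen (rs : List (List Int)) (out : List (List Int)) :
    split_after_ccs_loop rs false out = out ++ split_after_ccs_alt rs := by
  induction rs generalizing out with
  | nil => simp [split_after_ccs_loop, split_after_ccs_alt]
  | cons r rest ih =>
      by_cases h : PySem.List.pyGet? r 0 = some 20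
      · simp [split_after_ccs_loop, split_after_ccs_alt, h, split_after_ccs_loop_seen]
      · simp [split_after_ccs_loop, split_after_ccs_alt, h, ih]

-- ===== VERDICT (by name: the statement is the Claim_ definition above) =====
theorem split_after_ccs_spec : Claim_equal_split_after_ccs := by
  intro records _ _
  unfold Spec_split_after_ccs split_after_ccs
  simpa using split_after_ccs_loop_unseen records []
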